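-- pv_equiv track=rewrite | github.com/ashlight11/MarsLander | atterissage.py | zoneAtterissage
-- ===== SOURCE A (Python) =====
-- def zoneAtterissage(plateau):
--     begin_flat = 0
--     end_flat = 0
--     for index, element in enumerate(plateau):
--         if index != len(plateau) - 1 and element[1] == plateau[index + 1][1]:
--             begin_flat = element
--             end_flat = plateau[index + 1]
--
--     return begin_flat, end_flat
-- ===== SOURCE B (Python) =====
-- def zoneAtterissage(plateau):
--     # Reverse scan over adjacent pairs with early return: the first flat pair
--     # found from the end is the last one a forward pass would keep.
--     for a, b in reversed(list(zip(plateau, plateau[1:]))):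
--         if a[1] == b[1]:
--             return a, b
--     return 0, 0
-- ===== Notes on version B (the rewrite author's own statement) =====
-- stated objective: alternative
-- what changed: A makes a full forward pass over enumerate(plateau), overwriting accumulator variables at every flat pair; B scans the list of adjacent pairs from the end and returns immediately at the first flat pair, keeping no running state.
-- outside the precondition, e.g. on zoneAtterissage([(0, 1), (1, 2)]): A returns (0, 0), B returns (0, 0)
import Mathlib
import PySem

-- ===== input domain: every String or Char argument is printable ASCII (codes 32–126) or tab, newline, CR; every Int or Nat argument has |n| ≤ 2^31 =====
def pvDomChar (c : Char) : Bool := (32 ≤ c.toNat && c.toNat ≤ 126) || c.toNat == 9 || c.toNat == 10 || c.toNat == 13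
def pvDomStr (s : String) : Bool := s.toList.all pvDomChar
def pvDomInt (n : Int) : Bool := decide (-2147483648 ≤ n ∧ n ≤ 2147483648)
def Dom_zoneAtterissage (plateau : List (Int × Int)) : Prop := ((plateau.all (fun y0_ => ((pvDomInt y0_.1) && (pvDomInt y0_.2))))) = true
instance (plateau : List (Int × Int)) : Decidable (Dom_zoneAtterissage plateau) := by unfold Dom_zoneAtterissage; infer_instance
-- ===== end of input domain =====

-- B replaces A's full forward pass with mutable accumulators by an early-returning
-- reverse scan over the adjacent-pairs list (objective: alternative decomposition).


-- ===== PORT A =====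
-- begin_flat/end_flat start as the Python int 0 (not a point pair); that state is
-- represented by `none`, and the no-flat-pair case — where Python returns (0, 0),
-- not a value of the declared pair-of-pairs type — is excluded by Pre_ below.
def zoneAtterissage (plateau : List (Int × Int)) : (Int × Int) × (Int × Int) :=
  let st := (PySem.List.enumerate plateau).foldl
    (fun (acc : Option ((Int × Int) × (Int × Int))) ie =>
      if ie.1 ≠ (plateau.length : Int) - 1 then
        match PySem.List.pyGet? plateau (ie.1 + 1) with
        | some nxt => if ie.2.2 = nxt.2 then some (ie.2, nxt) else acc
        | none => acc
      else acc) none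
  match st with
  | some p => p
  | none => ((0, 0), (0, 0))

-- ===== PORT B =====
-- first flat pair of the given (reversed) adjacent-pairs list, early return
def altFind : List ((Int × Int) × (Int × Int)) → (Int × Int) × (Int × Int)
  | [] => ((0, 0), (0, 0))
  | p :: rest => if p.1.2 = p.2.2 then p else altFind rest

def zoneAtterissage_alt (plateau : List (Int × Int)) : (Int × Int) × (Int × Int) :=
  altFind ((plateau.zip plateau.tail).reverse)

-- ===== PRECONDITION & SPEC =====
-- Pre_ excludes inputs with no flat adjacent pair: there Python A returns (0, 0),
-- a pair of ints rather than a pair of point pairs, i.e. not a value of the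
-- declared return type (and Python B returns the same (0, 0) there).
def Pre_zoneAtterissage (plateau : List (Int × Int)) : Prop :=
  (plateau.zip plateau.tail).any (fun p => p.1.2 == p.2.2) = true
instance (plateau : List (Int × Int)) : Decidable (Pre_zoneAtterissage plateau) := by
  unfold Pre_zoneAtterissage; infer_instance

def pvWitness_zoneAtterissage : (List (Int × Int)) := [(0, 1), (2, 1), (3, 4)]

def Spec_zoneAtterissage (plateau : List (Int × Int)) (out : (Int × Int) × (Int × Int)) : Prop := out = zoneAtterissage_alt plateau
instance (plateau : List (Int × Int)) (out : (Int × Int) × (Int × Int)) : Decidable (Spec_zoneAtterissage plateau out) := by unfold Spec_zoneAtterissage; infer_instance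

-- ===== CLAIM (what is proved, stated in full; the proofs are below) =====
def Claim_equal_zoneAtterissage : Prop := ∀ (plateau : List (Int × Int)), Dom_zoneAtterissage plateau → Pre_zoneAtterissage plateau → Spec_zoneAtterissage plateau (zoneAtterissage plateau)

-- ===== LEMMAS AND PROOFS =====

-- A's step and the plain last-match step over the zip list
def stepA (plateau : List (Int × Int)) (acc : Option ((Int × Int) × (Int × Int)))
    (ie : Int × (Int × Int)) : Option ((Int × Int) × (Int × Int)) :=
  if ie.1 ≠ (plateau.length : Int) - 1 then
    match PySem.List.pyGet? plateau (ie.1 + 1) with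
    | some nxt => if ie.2.2 = nxt.2 then some (ie.2, nxt) else acc
    | none => acc
  else acc

def stepZ (acc : Option ((Int × Int) × (Int × Int))) (p : (Int × Int) × (Int × Int)) :
    Option ((Int × Int) × (Int × Int)) :=
  if p.1.2 = p.2.2 then some p else acc

-- Re-indexing: A's fold over enumerate = the plain fold over the adjacent-pairs suffixes
theorem foldA_eq_foldZ (plateau : List (Int × Int)) :
    ∀ (k : Nat) (acc : Option ((Int × Int) × (Int × Int))),
      ((PySem.List.enumerate (plateau.drop k) (k : Int)).foldl (stepA plateau) acc)
        = (((plateau.zip plateau.tail).drop k).foldl stepZ acc) := by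
  intro k
  induction hn : plateau.length - k using Nat.strong_induction_on generalizing k with
  | _ n ih =>
  intro acc
  by_cases hk : plateau.length ≤ k
  · have h1 : plateau.drop k = [] := List.drop_eq_nil_of_le hk
    have h2 : (plateau.zip plateau.tail).drop k = [] := by
      apply List.drop_eq_nil_of_le
      simp [List.length_zip, List.length_tail]
      omega
    simp [h1, h2, PySem.List.enumerate]
  · push_neg at hk
    have hdrop : plateau.drop k = plateau[k] :: plateau.drop (k + 1) :=
      List.drop_eq_getElem_cons hk
    rw [hdrop, PySem.List.enumerate_cons]
    rw [List.foldl_cons]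
    have ihk : ∀ acc', ((PySem.List.enumerate (plateau.drop (k+1)) ((k:Int) + 1)).foldl (stepA plateau) acc')
        = (((plateau.zip plateau.tail).drop (k+1)).foldl stepZ acc') := by
      intro acc'
      have := ih (plateau.length - (k+1)) (by omega) (k+1) rfl acc'
      simpa using this
    by_cases hlast : k + 1 < plateau.length
    · -- k is not the last index: A's branch fires, zip list has element k
      have hcond : (k : Int) ≠ (plateau.length : Int) - 1 := by omega
      have hget : PySem.List.pyGet? plateau ((k : Int) + 1) = some plateau[k+1] := by
        have : ((k : Int) + 1) = ((k + 1 : Nat) : Int) := by push_cast; ring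
        rw [this, PySem.List.pyGet?_natCast]
        simp [hlast]
      have hzlen : k < (plateau.zip plateau.tail).length := by
        simp [List.length_zip, List.length_tail]; omega
      have hzdrop : (plateau.zip plateau.tail).drop k
          = (plateau.zip plateau.tail)[k] :: (plateau.zip plateau.tail).drop (k+1) :=
        List.drop_eq_getElem_cons hzlen
      have hzget : (plateau.zip plateau.tail)[k] = (plateau[k], plateau[k+1]) := by
        have ht : k < plateau.tail.length := by simp [List.length_tail]; omega
        simp [List.getElem_zip, List.getElem_tail]
      rw [hzdrop, List.foldl_cons, hzget]
      rw [show stepA plateau acc ((k : Int), plateau[k])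
            = stepZ acc (plateau[k], plateau[k+1]) by
        simp [stepA, stepZ, hcond, hget]]
      exact ihk _
    · -- k is the last index: A's guard fails, zip list is exhausted
      have hcond : (k : Int) = (plateau.length : Int) - 1 := by omega
      have h2 : (plateau.zip plateau.tail).drop k = [] := by
        apply List.drop_eq_nil_of_le
        simp [List.length_zip, List.length_tail]; omega
      have h3 : (plateau.zip plateau.tail).drop (k+1) = [] := by
        apply List.drop_eq_nil_of_le
        simp [List.length_zip, List.length_tail]; omega
      rw [show stepA plateau acc ((k : Int), plateau[k]) = acc by
        simp [stepA, hcond]]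
      rw [h2, ihk acc, h3]

-- last match by a left fold = first match in the reverse
theorem foldZ_eq_find (P : List ((Int × Int) × (Int × Int))) :
    ∀ acc, P.foldl stepZ acc
      = match P.reverse.find? (fun p => p.1.2 == p.2.2) with
        | some p => some p
        | none => acc := by
  induction P with
  | nil => intro acc; simp
  | cons p rest ih =>
    intro acc
    rw [List.foldl_cons, ih, List.reverse_cons, List.find?_append]
    cases h : rest.reverse.find? (fun p => p.1.2 == p.2.2) with
    | some q => simp [Option.orElse]
    | none =>
      simp only [List.find?_cons, List.find?_nil]
      by_cases hp : p.1.2 = p.2.2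
      · simp [stepZ, hp]
      · rw [show (p.1.2 == p.2.2) = false by simpa using hp]
        simp [stepZ, hp]

theorem altFind_eq_find (L : List ((Int × Int) × (Int × Int))) :
    altFind L = match L.find? (fun p => p.1.2 == p.2.2) with
                | some p => p
                | none => ((0, 0), (0, 0)) := by
  induction L with
  | nil => simp [altFind]
  | cons p rest ih =>
    by_cases hp : p.1.2 = p.2.2 <;> simp [altFind, List.find?_cons, hp, ih]

-- ===== VERDICT (by name: the statement is the Claim_ definition above) =====
theorem zoneAtterissage_spec : Claim_equal_zoneAtterissage := by
  intro plateau _ hpre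
  unfold Spec_zoneAtterissage zoneAtterissage zoneAtterissage_alt
  have h0 := foldA_eq_foldZ plateau 0 none
  simp only [List.drop_zero, Nat.cast_zero] at h0
  rw [show ((PySem.List.enumerate plateau).foldl
      (fun (acc : Option ((Int × Int) × (Int × Int))) ie =>
        if ie.1 ≠ (plateau.length : Int) - 1 then
          match PySem.List.pyGet? plateau (ie.1 + 1) with
          | some nxt => if ie.2.2 = nxt.2 then some (ie.2, nxt) else acc
          | none => acc
        else acc) none)
      = ((plateau.zip plateau.tail).foldl stepZ none) from h0]
  rw [foldZ_eq_find, altFind_eq_find]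
  unfold Pre_zoneAtterissage at hpre
  rw [List.any_eq_true] at hpre
  obtain ⟨p, hp, hpeq⟩ := hpre
  have : (plateau.zip plateau.tail).reverse.find? (fun p => p.1.2 == p.2.2) ≠ none := by
    rw [Ne, List.find?_eq_none]
    push_neg
    exact ⟨p, by simpa using hp, hpeq⟩
  cases h : (plateau.zip plateau.tail).reverse.find? (fun p => p.1.2 == p.2.2) with
  | none => exact absurd h this
  | some q => rfl
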